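-- pv_equiv track=rewrite | github.com/chvjak/hr-practice | rust_murderer.py | dfs
-- ===== SOURCE A (Python) =====
-- from collections import deque
--
-- def dfs(s, adj_mtx):
--     N = len(adj_mtx)
--     q = deque()
--     q.append(s)
--     levels = [None] * N
--     levels[s] = 0
--     not_discovered = set(range(N))
--     not_discovered.remove(s)
--
--     while q:
--         v = q.popleft()
--
--         adj = [i for i in not_discovered if i not in adj_mtx[v]]
--         for vn in adj:
--             if levels[vn] is None:
--                 levels[vn] = levels[v] + 1
--                 q.append(vn)
--                 not_discovered.remove(vn)
--
--     return levels[:s] + levels[s + 1:]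
-- ===== SOURCE B (Python) =====
-- def dfs(s, adj_mtx):
--     # Level-synchronous BFS on the complement graph: instead of a vertex queue,
--     # advance a whole frontier per round with list comprehensions; no deque,
--     # no visited flags, distances come from a round counter.
--     N = len(adj_mtx)
--     levels = [None] * N
--     levels[s] = 0
--     frontier = [s]
--     rest = [i for i in range(N) if i != s]
--     d = 0
--     while frontier:
--         d += 1
--         nxt = [i for i in rest if any(i not in adj_mtx[v] for v in frontier)]
--         rest = [i for i in rest if i not in nxt]
--         for i in nxt:
--             levels[i] = d
--         frontier = nxt
--     return levels[:s] + levels[s + 1:]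
-- ===== Notes on version B (the rewrite author's own statement) =====
-- stated objective: alternative
-- what changed: Replaces A's vertex-at-a-time queue BFS (deque, per-dequeue candidate list, shrinking not_discovered set, levels read back to compute the child's level) with a level-synchronous BFS that advances a whole frontier per round: next frontier and remaining vertices are computed by list comprehensions over the current frontier and a round counter supplies the distance; there is no queue and no per-vertex visited bookkeeping.
import Mathlib
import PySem

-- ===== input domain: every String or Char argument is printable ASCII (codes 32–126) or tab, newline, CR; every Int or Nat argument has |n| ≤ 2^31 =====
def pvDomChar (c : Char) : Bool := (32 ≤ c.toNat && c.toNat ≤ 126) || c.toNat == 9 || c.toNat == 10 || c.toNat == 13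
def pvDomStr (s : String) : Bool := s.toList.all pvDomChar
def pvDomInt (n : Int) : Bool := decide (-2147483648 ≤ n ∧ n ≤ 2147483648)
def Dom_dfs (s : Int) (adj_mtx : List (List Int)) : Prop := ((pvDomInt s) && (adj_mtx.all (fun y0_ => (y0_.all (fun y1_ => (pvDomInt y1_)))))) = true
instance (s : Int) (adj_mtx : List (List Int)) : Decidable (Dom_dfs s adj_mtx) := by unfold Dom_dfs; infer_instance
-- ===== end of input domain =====

-- B replaces A's vertex-at-a-time queue BFS (deque + shrinking not_discovered set) by a
-- level-synchronous BFS: whole-frontier rounds built by list comprehensions, with a round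
-- counter supplying the distance; no queue, no per-vertex visited bookkeeping (objective:
-- alternative).

-- ===== PORT A =====
-- A iterates over a Python set of the ints 0..N-1 (not_discovered); we keep the PySem.Set's
-- list order (ascending here, = CPython's order for these small ints); the returned levels are
-- BFS distances and do not depend on that order, as the equivalence proof below shows.
-- Loop body of 'for vn in adj': one step of A's inner for-loop over the snapshot list adj.
def dfsStepA (v : Int)
    (st : List Int × List (Option Int) × PySem.Set Int) (vn : Int) :
    List Int × List (Option Int) × PySem.Set Int :=
  if PySem.List.pyGetD st.2.1 vn none = none then
    -- levels[vn] = levels[v] + 1 : levels[v] is an int (never None) whenever v is dequeued,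
    -- so the .getD 0 placeholder is never the value used
    (st.1 ++ [vn],
     PySem.List.pySetD st.2.1 vn (some ((PySem.List.pyGetD st.2.1 v none).getD 0 + 1)),
     -- vn ∈ not_discovered here, so set.remove = set.discard
     PySem.Set.discard st.2.2 vn)
  else st

-- the 'while q:' loop; fuel bounds the number of iterations (each vertex is dequeued at most
-- once, so N+1 iterations always suffice: the guard only makes the recursion total)
def dfsLoopA (adj_mtx : List (List Int)) :
    Nat → List Int → List (Option Int) → PySem.Set Int → List (Option Int)
  | 0, _, levels, _ => levels
  | _ + 1, [], levels, _ => levels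
  | fuel + 1, v :: q, levels, nd =>
    -- adj = [i for i in not_discovered if i not in adj_mtx[v]]
    let adj := nd.filter (fun i => !(PySem.List.pyGetD adj_mtx v []).contains i)
    let st := adj.foldl (dfsStepA v) (q, levels, nd)
    dfsLoopA adj_mtx fuel st.1 st.2.1 st.2.2

def dfs (s : Int) (adj_mtx : List (List Int)) : List (Option Int) :=
  let N : Nat := adj_mtx.length
  -- levels = [None]*N ; levels[s] = 0
  let levels0 := PySem.List.pySetD (List.replicate N (none : Option Int)) s (some 0)
  -- not_discovered = set(range(N)) ; not_discovered.remove(s)  (s ∈ the set under Pre_)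
  let nd0 := PySem.Set.discard (PySem.Set.ofList (PySem.List.pyRange 0 (N : Int) 1)) s
  let levels := dfsLoopA adj_mtx (N + 1) [s] levels0 nd0
  -- levels[:s] + levels[s+1:]
  PySem.List.slice levels none (some s) ++ PySem.List.slice levels (some (s + 1)) none

-- ===== PORT B =====
-- the 'while frontier:' loop of Source B: one recursive call per ROUND; the whole next frontier
-- 'nxt', the surviving 'rest' and the updated levels are computed by the round's three passes
def dfsLoopB (adj_mtx : List (List Int)) :
    Nat → List Int → List (Option Int) → List Int → Int → List (Option Int)
  | 0, _, levels, _, _ => levels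
  | _ + 1, [], levels, _, _ => levels
  | fuel + 1, f :: fr, levels, rest, d =>
    let frontier := f :: fr
    let d' := d + 1
    -- nxt = [i for i in rest if any(i not in adj_mtx[v] for v in frontier)]
    let nxt := rest.filter (fun i =>
      frontier.any (fun v => !(PySem.List.pyGetD adj_mtx v []).contains i))
    -- rest = [i for i in rest if i not in nxt]
    let rest' := rest.filter (fun i => !nxt.contains i)
    -- for i in nxt: levels[i] = d
    let levels' := nxt.foldl (fun ls i => PySem.List.pySetD ls i (some d')) levels
    dfsLoopB adj_mtx fuel nxt levels' rest' d'

def dfs_alt (s : Int) (adj_mtx : List (List Int)) : List (Option Int) :=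
  let N : Nat := adj_mtx.length
  let levels0 := PySem.List.pySetD (List.replicate N (none : Option Int)) s (some 0)
  -- rest = [i for i in range(N) if i != s]
  let rest0 := (PySem.List.pyRange 0 (N : Int) 1).filter (fun i => i != s)
  let levels := dfsLoopB adj_mtx (N + 1) [s] levels0 rest0 0
  PySem.List.slice levels none (some s) ++ PySem.List.slice levels (some (s + 1)) none

-- ===== PRECONDITION & SPEC =====
-- A raises exactly when s is not a valid nonnegative index: IndexError on levels[s] for
-- s ≥ N or s < -N (and any s when N = 0), KeyError on not_discovered.remove(s) for -N ≤ s < 0.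
def Pre_dfs (s : Int) (adj_mtx : List (List Int)) : Prop :=
  0 ≤ s ∧ s < (adj_mtx.length : Int)
instance (s : Int) (adj_mtx : List (List Int)) : Decidable (Pre_dfs s adj_mtx) := by
  unfold Pre_dfs; infer_instance

def pvWitness_dfs : Int × List (List Int) := (0, [[1], []])

def Spec_dfs (s : Int) (adj_mtx : List (List Int)) (out : List (Option Int)) : Prop :=
  out = dfs_alt s adj_mtx
instance (s : Int) (adj_mtx : List (List Int)) (out : List (Option Int)) :
    Decidable (Spec_dfs s adj_mtx out) := by unfold Spec_dfs; infer_instance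

-- ===== CLAIM (what is proved, stated in full; the proofs are below) =====
def Claim_equal_dfs : Prop := ∀ (s : Int) (adj_mtx : List (List Int)),
  Dom_dfs s adj_mtx → Pre_dfs s adj_mtx → Spec_dfs s adj_mtx (dfs s adj_mtx)

-- ===== LEMMAS AND PROOFS =====

-- write the same value at every index of idxs
def pvSetAll {α : Type} (d : α) (idxs : List Int) (xs : List α) : List α :=
  idxs.foldl (fun xs i => PySem.List.pySetD xs i d) xs

theorem pv_get_set_ne {α : Type} (xs : List α) {i j : Int} (v d : α)
    (hi : 0 ≤ i) (hj : 0 ≤ j) (hne : i ≠ j) :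
    PySem.List.pyGetD (PySem.List.pySetD xs i v) j d = PySem.List.pyGetD xs j d := by
  rcases Int.eq_ofNat_of_zero_le hj with ⟨n, rfl⟩
  rw [PySem.List.pySetD_of_nonneg xs v hi, PySem.List.pyGetD_natCast, PySem.List.pyGetD_natCast]
  have h : i.toNat ≠ n := by omega
  simp [List.getD_eq_getElem?_getD, List.getElem?_set_ne h]

theorem pv_get_set_self {α : Type} (xs : List α) {i : Int} (v d : α)
    (hi : 0 ≤ i) (hlt : i < (xs.length : Int)) :
    PySem.List.pyGetD (PySem.List.pySetD xs i v) i d = v := by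
  rw [PySem.List.pySetD_of_nonneg xs v hi,
      PySem.List.pyGetD_eq_getElem _ d hi (by simpa using hlt)]
  simp

theorem pv_get_replicate {α : Type} (c d : α) (N : Nat) {i : Int}
    (h0 : 0 ≤ i) (h1 : i < (N : Int)) :
    PySem.List.pyGetD (List.replicate N c) i d = c := by
  rw [PySem.List.pyGetD_eq_getElem _ d h0 (by simpa using h1)]
  simp

-- a nonnegative index holding a non-default value is in range
theorem pv_get_ne_default {α : Type} (xs : List α) (d : α) {i : Int}
    (h0 : 0 ≤ i) (h : PySem.List.pyGetD xs i d ≠ d) : i < (xs.length : Int) := by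
  by_contra hge
  rcases Int.eq_ofNat_of_zero_le h0 with ⟨n, rfl⟩
  rw [PySem.List.pyGetD_natCast, List.getD_eq_default] at h
  · exact h rfl
  · omega

theorem pvSetAll_length {α : Type} (d : α) (idxs : List Int) :
    ∀ (xs : List α), (pvSetAll d idxs xs).length = xs.length := by
  induction idxs with
  | nil => intro xs; rfl
  | cons a t ih =>
    intro xs
    show (pvSetAll d t (PySem.List.pySetD xs a d)).length = xs.length
    rw [ih, PySem.List.length_pySetD]

theorem pvSetAll_get {α : Type} (d : α) (idxs : List Int) {i : Int} (dflt : α)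
    (hi : 0 ≤ i) (hall : ∀ j ∈ idxs, 0 ≤ j) :
    ∀ (xs : List α), i < (xs.length : Int) →
    PySem.List.pyGetD (pvSetAll d idxs xs) i dflt =
      if i ∈ idxs then d else PySem.List.pyGetD xs i dflt := by
  induction idxs with
  | nil => intro xs _; simp [pvSetAll]
  | cons a t ih =>
    intro xs hlt
    have ha : 0 ≤ a := hall a (by simp)
    have hts : ∀ j ∈ t, 0 ≤ j := fun j hj => hall j (List.mem_cons_of_mem _ hj)
    have hlt' : i < (((PySem.List.pySetD xs a d).length : Nat) : Int) := by
      rw [PySem.List.length_pySetD]; exact hlt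
    show PySem.List.pyGetD (pvSetAll d t (PySem.List.pySetD xs a d)) i dflt = _
    rw [ih hts (PySem.List.pySetD xs a d) hlt']
    by_cases hia : i = a
    · subst hia
      by_cases hit : i ∈ t
      · simp [hit]
      · simp [hit, pv_get_set_self xs d dflt hi hlt]
    · have hne : a ≠ i := fun h => hia h.symm
      simp [List.mem_cons, hia, pv_get_set_ne xs d dflt ha hi hne]

-- writing the same value at membership-equal nonneg in-range index lists gives equal lists
theorem pvSetAll_ext {α : Type} (d : α) (l1 l2 : List Int) (xs : List α)
    (h1 : ∀ j ∈ l1, 0 ≤ j) (h2 : ∀ j ∈ l2, 0 ≤ j)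
    (hm : ∀ i, i ∈ l1 ↔ i ∈ l2) :
    pvSetAll d l1 xs = pvSetAll d l2 xs := by
  apply List.ext_getElem
  · rw [pvSetAll_length, pvSetAll_length]
  · intro k hk1 hk2
    have hkx : k < xs.length := by rwa [pvSetAll_length] at hk1
    have hg : ∀ (l : List Int), (∀ j ∈ l, 0 ≤ j) → (pvSetAll d l xs)[k]'(by rw [pvSetAll_length]; exact hkx)
        = if (k : Int) ∈ l then d else PySem.List.pyGetD xs (k : Int) d := by
      intro l hl
      have := pvSetAll_get d l (i := (k : Int)) d (by positivity) hl xs (by exact_mod_cast hkx)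
      rw [PySem.List.pyGetD_eq_getElem _ d (by positivity)
            (by simpa [pvSetAll_length] using hkx)] at this
      simpa using this
    rw [hg l1 h1, hg l2 h2]
    by_cases hk : (k : Int) ∈ l1
    · simp [hk, (hm _).mp hk]
    · have hk2' : (k : Int) ∉ l2 := fun h => hk ((hm _).mpr h)
      rw [if_neg hk, if_neg hk2']

theorem pv_foldl_discard : ∀ (adj nd : List Int),
    adj.foldl PySem.Set.discard nd = nd.filter (fun x => !adj.contains x) := by
  intro adj
  induction adj with
  | nil => intro nd; simp
  | cons a t ih =>
    intro nd
    rw [List.foldl_cons, ih]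
    show (PySem.Set.discard nd a).filter _ = _
    simp only [PySem.Set.discard, List.filter_filter]
    apply List.filter_congr
    intro x _
    by_cases hxa : x = a <;> by_cases hxt : x ∈ t <;> simp [hxa, hxt]

-- A's inner for-loop over the snapshot list adj, characterised in one shot
theorem pv_foldA_char (_adj_mtx : List (List Int)) (v : Int) (hv : 0 ≤ v) :
    ∀ (adj q : List Int) (levels : List (Option Int)) (nd : PySem.Set Int),
    adj.Nodup →
    (∀ i ∈ adj, 0 ≤ i ∧ PySem.List.pyGetD levels i none = none) →
    PySem.List.pyGetD levels v none ≠ none →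
    adj.foldl (dfsStepA v) (q, levels, nd) =
      (q ++ adj,
       pvSetAll (some ((PySem.List.pyGetD levels v none).getD 0 + 1)) adj levels,
       adj.foldl PySem.Set.discard nd) := by
  intro adj
  induction adj with
  | nil => intro q levels nd _ _ _; simp [pvSetAll]
  | cons a t ih =>
    intro q levels nd hnd hmem hlv
    obtain ⟨ha0, hlva⟩ := hmem a (by simp)
    have hvna : v ≠ a := by intro h; rw [h] at hlv; exact hlv hlva
    have hanv : a ≠ v := fun h => hvna h.symm
    obtain ⟨hat, htn⟩ := List.nodup_cons.mp hnd
    have hstep : dfsStepA v (q, levels, nd) a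
        = (q ++ [a],
           PySem.List.pySetD levels a (some ((PySem.List.pyGetD levels v none).getD 0 + 1)),
           PySem.Set.discard nd a) := by
      simp [dfsStepA, hlva]
    have hlv1 : PySem.List.pyGetD
        (PySem.List.pySetD levels a (some ((PySem.List.pyGetD levels v none).getD 0 + 1)))
        v none = PySem.List.pyGetD levels v none :=
      pv_get_set_ne levels _ none ha0 hv hanv
    rw [List.foldl_cons, hstep,
        ih (q ++ [a]) _ (PySem.Set.discard nd a) htn
          (fun i hi => ⟨(hmem i (List.mem_cons_of_mem _ hi)).1,
            by
              rw [pv_get_set_ne levels _ none ha0 (hmem i (List.mem_cons_of_mem _ hi)).1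
                    (fun h => hat (h ▸ hi))]
              exact (hmem i (List.mem_cons_of_mem _ hi)).2⟩)
          (by rw [hlv1]; exact hlv)]
    rw [hlv1]
    simp [pvSetAll]

-- .any over membership-equal lists agrees
theorem pv_any_congr {α : Type} (p : α → Bool) (l1 l2 : List α)
    (hm : ∀ x, x ∈ l1 ↔ x ∈ l2) : l1.any p = l2.any p := by
  cases h1 : l1.any p
  · cases h2 : l2.any p
    · rfl
    · obtain ⟨x, hx, hpx⟩ := List.any_eq_true.mp h2
      rw [List.any_eq_false] at h1
      exact absurd hpx (by simpa using h1 x ((hm x).mpr hx))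
  · obtain ⟨x, hx, hpx⟩ := List.any_eq_true.mp h1
    exact (List.any_eq_true.mpr ⟨x, (hm x).mp hx, hpx⟩).symm

theorem pv_filter_partition {α : Type} (p : α → Bool) :
    ∀ (l : List α), (l.filter p).length + (l.filter (fun a => !p a)).length = l.length := by
  intro l
  induction l with
  | nil => rfl
  | cons a t ih => cases h : p a <;> simp [h, ← ih] <;> omega

-- Fast-forward A through one whole frontier F (queue = F ++ acc, all of F at level d):
-- it discovers exactly the undiscovered complement-neighbours of F, at level d+1
theorem pv_round_A (adj_mtx : List (List Int)) (d : Int) :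
    ∀ (F acc : List Int) (levels : List (Option Int)) (nd : PySem.Set Int) (fuel : Nat),
    F.Nodup →
    (∀ v ∈ F, 0 ≤ v ∧ PySem.List.pyGetD levels v none = some d) →
    (∀ i, i ∈ nd ↔ (0 ≤ i ∧ i < (levels.length : Int) ∧
                    PySem.List.pyGetD levels i none = none)) →
    nd.Nodup →
    ∃ D : List Int, D.Nodup ∧
      (∀ i, i ∈ D ↔ i ∈ nd ∧
        F.any (fun v => !(PySem.List.pyGetD adj_mtx v []).contains i) = true) ∧
      dfsLoopA adj_mtx (fuel + F.length) (F ++ acc) levels nd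
        = dfsLoopA adj_mtx fuel (acc ++ D)
            (pvSetAll (some (d + 1)) D levels)
            (nd.filter (fun i =>
              !(F.any (fun v => !(PySem.List.pyGetD adj_mtx v []).contains i)))) := by
  intro F
  induction F with
  | nil =>
    intro acc levels nd fuel _ _ _ _
    refine ⟨[], List.nodup_nil, by simp, ?_⟩
    simp [pvSetAll]
  | cons v F' ih =>
    intro acc levels nd fuel hFnd hF hinv hndn
    obtain ⟨hv0, hlvv⟩ := hF v (by simp)
    obtain ⟨hvF', hF'nd⟩ := List.nodup_cons.mp hFnd
    have hlvne : PySem.List.pyGetD levels v none ≠ none := by rw [hlvv]; simp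
    -- the snapshot candidate list of the head vertex
    set adjv := nd.filter (fun i => !(PySem.List.pyGetD adj_mtx v []).contains i) with hadjv
    have hadjnd : adjv.Nodup := hndn.filter _
    have hadjmem : ∀ i ∈ adjv, i ∈ nd ∧ (!(PySem.List.pyGetD adj_mtx v []).contains i) = true :=
      fun i hi => List.mem_filter.mp hi
    have hadjinv : ∀ i ∈ adjv, 0 ≤ i ∧ PySem.List.pyGetD levels i none = none := by
      intro i hi
      obtain ⟨h0, h1, h2⟩ := (hinv i).mp (hadjmem i hi).1
      exact ⟨h0, h2⟩
    have hadjlt : ∀ i ∈ adjv, i < (levels.length : Int) := by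
      intro i hi
      exact ((hinv i).mp (hadjmem i hi).1).2.1
    have hadj0 : ∀ i ∈ adjv, 0 ≤ i := fun i hi => (hadjinv i hi).1
    set levels1 := pvSetAll (some (d + 1)) adjv levels with hlevels1
    set nd1 := nd.filter (fun i => (PySem.List.pyGetD adj_mtx v []).contains i) with hnd1
    have hlen1 : levels1.length = levels.length := pvSetAll_length _ _ _
    -- levels1 at an index: written iff in adjv
    have hget1 : ∀ (i : Int), 0 ≤ i → i < (levels.length : Int) →
        PySem.List.pyGetD levels1 i none
          = if i ∈ adjv then some (d + 1) else PySem.List.pyGetD levels i none := by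
      intro i h0 h1
      exact pvSetAll_get _ adjv none h0 hadj0 levels h1
    -- F' invariant after the head's updates
    have hF1 : ∀ w ∈ F', 0 ≤ w ∧ PySem.List.pyGetD levels1 w none = some d := by
      intro w hw
      obtain ⟨hw0, hlw⟩ := hF w (List.mem_cons_of_mem _ hw)
      have hwlt : w < (levels.length : Int) :=
        pv_get_ne_default levels none hw0 (by rw [hlw]; simp)
      have hwadj : w ∉ adjv := by
        intro hmem
        rw [(hadjinv w hmem).2] at hlw
        exact absurd hlw (by simp)
      refine ⟨hw0, ?_⟩
      rw [hget1 w hw0 hwlt, if_neg hwadj, hlw]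
    -- nd invariant after the head's updates
    have hinv1 : ∀ i, i ∈ nd1 ↔ (0 ≤ i ∧ i < (levels1.length : Int) ∧
        PySem.List.pyGetD levels1 i none = none) := by
      intro i
      rw [hlen1]
      constructor
      · intro hi
        obtain ⟨hind, hnc⟩ := List.mem_filter.mp hi
        obtain ⟨h0, h1, h2⟩ := (hinv i).mp hind
        have hiadj : i ∉ adjv := by
          intro hmem
          have h' := (hadjmem i hmem).2
          rw [hnc] at h'
          exact Bool.noConfusion h'
        exact ⟨h0, h1, by rw [hget1 i h0 h1, if_neg hiadj]; exact h2⟩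
      · rintro ⟨h0, h1, h2⟩
        rw [hget1 i h0 h1] at h2
        by_cases hiadj : i ∈ adjv
        · rw [if_pos hiadj] at h2; exact absurd h2 (by simp)
        · rw [if_neg hiadj] at h2
          have hind : i ∈ nd := (hinv i).mpr ⟨h0, h1, h2⟩
          refine List.mem_filter.mpr ⟨hind, ?_⟩
          by_cases hc : (PySem.List.pyGetD adj_mtx v []).contains i = true
          · exact hc
          · exact absurd (List.mem_filter.mpr ⟨hind, by simpa using hc⟩) hiadj
    have hnd1n : nd1.Nodup := hndn.filter _
    obtain ⟨D', hD'nd, hD'mem, hD'eq⟩ := ih (acc ++ adjv) levels1 nd1 fuel hF'nd hF1 hinv1 hnd1n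
    have hdisj : List.Disjoint adjv D' := by
      intro a ha hb
      obtain ⟨hand1, _⟩ := (hD'mem a).mp hb
      obtain ⟨_, hnc⟩ := List.mem_filter.mp hand1
      have h' := (hadjmem a ha).2
      rw [hnc] at h'
      exact Bool.noConfusion h'
    refine ⟨adjv ++ D', hadjnd.append hD'nd hdisj, ?_, ?_⟩
    · intro i
      constructor
      · intro hi
        rcases List.mem_append.mp hi with hia | hid
        · exact ⟨(hadjmem i hia).1, List.any_eq_true.mpr ⟨v, by simp, (hadjmem i hia).2⟩⟩
        · obtain ⟨hind1, hany⟩ := (hD'mem i).mp hid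
          obtain ⟨hind, _⟩ := List.mem_filter.mp hind1
          refine ⟨hind, ?_⟩
          obtain ⟨w, hw, hpw⟩ := List.any_eq_true.mp hany
          exact List.any_eq_true.mpr ⟨w, List.mem_cons_of_mem _ hw, hpw⟩
      · rintro ⟨hind, hany⟩
        by_cases hc : (!(PySem.List.pyGetD adj_mtx v []).contains i) = true
        · exact List.mem_append.mpr (Or.inl (List.mem_filter.mpr ⟨hind, hc⟩))
        · obtain ⟨w, hw, hpw⟩ := List.any_eq_true.mp hany
          rcases List.mem_cons.mp hw with rfl | hw'
          · exact absurd hpw hc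
          · refine List.mem_append.mpr (Or.inr ((hD'mem i).mpr
              ⟨List.mem_filter.mpr ⟨hind, by simpa using hc⟩,
               List.any_eq_true.mpr ⟨w, hw', hpw⟩⟩))
    · -- the loop equation
      have hsucc : fuel + (v :: F').length = (fuel + F'.length) + 1 := by
        simp only [List.length_cons]; omega
      rw [hsucc, List.cons_append, dfsLoopA]
      rw [← hadjv,
          pv_foldA_char adj_mtx v hv0 adjv (F' ++ acc) levels nd hadjnd hadjinv hlvne,
          hlvv]
      simp only [Option.getD_some]
      rw [pv_foldl_discard]
      have hfc : nd.filter (fun x => !adjv.contains x) = nd1 := by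
        apply List.filter_congr
        intro x hx
        by_cases hc : (PySem.List.pyGetD adj_mtx v []).contains x = true
        · have : x ∉ adjv := by
            intro hmem
            have := (hadjmem x hmem).2
            rw [hc] at this
            exact Bool.noConfusion this
          simp only [hc]
          simpa using this
        · have hxm : x ∈ adjv := List.mem_filter.mpr ⟨hx, by simpa using hc⟩
          have hcf : (PySem.List.pyGetD adj_mtx v []).contains x = false := by
            simpa using hc
          simp only [hcf]
          simpa using hxm
      rw [hfc]
      have hq : F' ++ acc ++ adjv = F' ++ (acc ++ adjv) := List.append_assoc _ _ _
      rw [hq, ← hlevels1, hD'eq]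
      congr 1
      · exact List.append_assoc _ _ _
      · show pvSetAll (some (d + 1)) D' (pvSetAll (some (d + 1)) adjv levels)
            = pvSetAll (some (d + 1)) (adjv ++ D') levels
        simp [pvSetAll, List.foldl_append]
      · rw [hnd1, List.filter_filter]
        apply List.filter_congr
        intro x _
        simp [List.any_cons, Bool.and_comm]

-- the heart: A's queue BFS and B's level-synchronous BFS compute the same levels array
theorem pv_main (adj_mtx : List (List Int)) :
    ∀ (n : Nat) (nd : PySem.Set Int), nd.length = n →
    ∀ (fuelA fuelB : Nat) (qA FB : List Int) (levels : List (Option Int)) (d : Int),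
    (∀ i, i ∈ qA ↔ i ∈ FB) → qA.Nodup → FB.Nodup →
    (∀ v ∈ qA, 0 ≤ v ∧ PySem.List.pyGetD levels v none = some d) →
    (∀ i, i ∈ nd ↔ (0 ≤ i ∧ i < (levels.length : Int) ∧
                    PySem.List.pyGetD levels i none = none)) →
    nd.Nodup →
    qA.length + nd.length ≤ fuelA → nd.length + 1 ≤ fuelB →
    dfsLoopA adj_mtx fuelA qA levels nd = dfsLoopB adj_mtx fuelB FB levels nd d := by
  intro n
  induction n using Nat.strong_induction_on with
  | _ n ih =>
    intro nd hlen fuelA fuelB qA FB levels d hm hqnd hFnd hq hinv hndn hfA hfB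
    cases qA with
    | nil =>
      have hFB : FB = [] := by
        cases FB with
        | nil => rfl
        | cons w F' => exact absurd ((hm w).mpr (by simp)) (by simp)
      subst hFB
      cases fuelA <;> cases fuelB <;> rfl
    | cons v q' =>
      have hvF : v ∈ FB := (hm v).mp (by simp)
      cases FB with
      | nil => simp at hvF
      | cons w F' =>
        -- fuel bookkeeping
        have hlq : (v :: q').length ≤ fuelA := le_trans (Nat.le_add_right _ _) hfA
        cases fuelB with
        | zero => omega
        | succ fB' =>
        -- fast-forward A through the whole frontier
        obtain ⟨D, hDnd, hDmem, hDeq⟩ :=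
          pv_round_A adj_mtx d (v :: q') [] levels nd (fuelA - (v :: q').length)
            hqnd hq hinv hndn
        have hfa' : (fuelA - (v :: q').length) + (v :: q').length = fuelA :=
          Nat.sub_add_cancel hlq
        -- one round of B
        rw [dfsLoopB]
        -- names for the round's lists
        set nxt := nd.filter (fun i =>
          (w :: F').any (fun u => !(PySem.List.pyGetD adj_mtx u []).contains i)) with hnxt
        set restA := nd.filter (fun i =>
          !((v :: q').any (fun u => !(PySem.List.pyGetD adj_mtx u []).contains i))) with hrestA
        set restB := nd.filter (fun i =>
          !((w :: F').any (fun u => !(PySem.List.pyGetD adj_mtx u []).contains i))) with hrestB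
        have hany : ∀ i : Int,
            (v :: q').any (fun u => !(PySem.List.pyGetD adj_mtx u []).contains i)
              = (w :: F').any (fun u => !(PySem.List.pyGetD adj_mtx u []).contains i) :=
          fun i => pv_any_congr _ _ _ hm
        have hrAB : restA = restB := by
          rw [hrestA, hrestB]
          apply List.filter_congr
          intro x _
          rw [hany x]
        have hDnxt : ∀ i, i ∈ D ↔ i ∈ nxt := by
          intro i
          rw [hDmem i, hnxt, List.mem_filter, hany i]
        have hnxtnd : nxt.Nodup := hndn.filter _
        have hrestnd : restB.Nodup := hndn.filter _
        have hnd0 : ∀ i ∈ nd, 0 ≤ i := fun i hi => ((hinv i).mp hi).1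
        have hD0 : ∀ j ∈ D, 0 ≤ j := by
          intro j hj
          exact hnd0 j (List.mem_filter.mp ((hDnxt j).mp hj)).1
        have hnxt0 : ∀ j ∈ nxt, 0 ≤ j := fun j hj => hnd0 j (List.mem_filter.mp hj).1
        have hlvext : pvSetAll (some (d + 1)) nxt levels = pvSetAll (some (d + 1)) D levels :=
          pvSetAll_ext _ _ _ _ hnxt0 hD0 (fun i => (hDnxt i).symm)
        -- B's foldl IS pvSetAll
        have hfold : nxt.foldl (fun ls i => PySem.List.pySetD ls i (some (d + 1))) levels
            = pvSetAll (some (d + 1)) nxt levels := rfl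
        have hrest' : nxt.foldl (fun ls i => PySem.List.pySetD ls i (some (d + 1))) levels
            = pvSetAll (some (d + 1)) D levels := by rw [hfold, hlvext]
        have hrestfix : nd.filter (fun i => !nxt.contains i) = restB := by
          rw [hrestB]
          apply List.filter_congr
          intro x hx
          by_cases hc : x ∈ nxt
          · have hat := (List.mem_filter.mp hc).2
            have h1 : nxt.contains x = true := by simpa using hc
            rw [hat, h1]
          · have hna : ((w :: F').any
                (fun u => !(PySem.List.pyGetD adj_mtx u []).contains x)) = false := by
              rw [Bool.eq_false_iff]
              intro ha
              exact hc (List.mem_filter.mpr ⟨hx, ha⟩)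
            have h1 : nxt.contains x = false := by simpa using hc
            rw [hna, h1]
        -- rewrite the A side
        rw [List.append_nil, hfa'] at hDeq
        have hAeq : dfsLoopA adj_mtx fuelA (v :: q') levels nd
            = dfsLoopA adj_mtx (fuelA - (v :: q').length) D
                (pvSetAll (some (d + 1)) D levels) restB := by
          rw [hDeq, List.nil_append, hrAB]
        rw [hAeq, hrest', hrestfix]
        -- levels' facts
        set levels' := pvSetAll (some (d + 1)) D levels with hlv'
        have hlen' : levels'.length = levels.length := pvSetAll_length _ _ _
        have hget' : ∀ (i : Int), 0 ≤ i → i < (levels.length : Int) →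
            PySem.List.pyGetD levels' i none
              = if i ∈ D then some (d + 1) else PySem.List.pyGetD levels i none :=
          fun i h0 h1 => pvSetAll_get _ D none h0 hD0 levels h1
        by_cases hne : nxt = []
        · -- nothing discovered: both loops stop returning levels'
          have hDnil : D = [] := by
            cases D with
            | nil => rfl
            | cons a D' =>
              exact absurd ((hDnxt a).mp (by simp)) (by rw [hne]; simp)
          subst hDnil
          rw [hne]
          cases (fuelA - (v :: q').length) <;> cases fB' <;> rfl
        · -- recurse on the strictly smaller undiscovered set
          have hpart : nxt.length + restB.length = List.length nd := by
            rw [hnxt, hrestB]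
            exact pv_filter_partition _ nd
          have hnxtpos : 1 ≤ nxt.length := by
            cases hx : nxt with
            | nil => exact absurd hx hne
            | cons a t => simp [hx]
          have hrlt : restB.length < n := by omega
          have hDlen : D.length = nxt.length :=
            (List.perm_ext_iff_of_nodup hDnd hnxtnd |>.mpr hDnxt).length_eq
          apply ih restB.length hrlt restB rfl
          · exact hDnxt
          · exact hDnd
          · exact hnxtnd
          · intro u hu
            obtain ⟨hund, _⟩ := List.mem_filter.mp ((hDnxt u).mp hu)
            obtain ⟨h0, h1, _⟩ := (hinv u).mp hund
            exact ⟨h0, by rw [hget' u h0 h1, if_pos hu]⟩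
          · intro i
            rw [hlen']
            constructor
            · intro hi
              obtain ⟨hind, hna⟩ := List.mem_filter.mp hi
              obtain ⟨h0, h1, h2⟩ := (hinv i).mp hind
              have hiD : i ∉ D := by
                intro hmem
                have := (List.mem_filter.mp ((hDnxt i).mp hmem)).2
                rw [this] at hna
                exact Bool.noConfusion hna
              exact ⟨h0, h1, by rw [hget' i h0 h1, if_neg hiD]; exact h2⟩
            · rintro ⟨h0, h1, h2⟩
              rw [hget' i h0 h1] at h2
              by_cases hiD : i ∈ D
              · rw [if_pos hiD] at h2; exact absurd h2 (by simp)
              · rw [if_neg hiD] at h2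
                have hind : i ∈ nd := (hinv i).mpr ⟨h0, h1, h2⟩
                refine List.mem_filter.mpr ⟨hind, ?_⟩
                by_cases ha : ((w :: F').any
                    (fun u => !(PySem.List.pyGetD adj_mtx u []).contains i)) = true
                · exact absurd ((hDnxt i).mpr (List.mem_filter.mpr ⟨hind, ha⟩)) hiD
                · rw [Bool.eq_false_iff.mpr ha]; rfl
          · exact hrestnd
          · omega
          · omega

-- ===== VERDICT (by name: the statement is the Claim_ definition above) =====
theorem dfs_spec : Claim_equal_dfs := by
  unfold Claim_equal_dfs
  intro s adj_mtx _ hpre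
  obtain ⟨hs0, hsN⟩ := hpre
  unfold Spec_dfs dfs dfs_alt
  simp only []
  set N : Nat := adj_mtx.length with hN
  set levels0 := PySem.List.pySetD (List.replicate N (none : Option Int)) s (some 0) with hl0
  have hlen0 : levels0.length = N := by
    rw [hl0, PySem.List.length_pySetD, List.length_replicate]
  have hsrep : s < ((List.replicate N (none : Option Int)).length : Int) := by simpa using hsN
  -- A's initial not_discovered equals B's initial rest, as a list
  have hsets : PySem.Set.discard (PySem.Set.ofList (PySem.List.pyRange 0 (N : Int) 1)) s
      = (PySem.List.pyRange 0 (N : Int) 1).filter (fun i => i != s) := by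
    rw [PySem.Set.ofList_eq_self_of_nodup _ (PySem.List.nodup_pyRange_one 0 (N : Int))]
    show (PySem.List.pyRange 0 (N : Int) 1).filter _ = _
    apply List.filter_congr
    intro x _
    simp [bne]
  set rest0 := (PySem.List.pyRange 0 (N : Int) 1).filter (fun i => i != s) with hr0
  have hget0 : ∀ (i : Int), 0 ≤ i → i < (N : Int) →
      PySem.List.pyGetD levels0 i none = if i = s then some 0 else none := by
    intro i h0 h1
    by_cases his : i = s
    · subst his
      rw [if_pos rfl, hl0, pv_get_set_self _ _ none h0 hsrep]
    · rw [if_neg his, hl0,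
          pv_get_set_ne _ _ none hs0 h0 (fun h => his h.symm),
          pv_get_replicate _ none N h0 h1]
  have key := pv_main adj_mtx rest0.length rest0 rfl (N + 1) (N + 1) [s] [s] levels0 0
    (fun i => Iff.rfl) (List.nodup_singleton s) (List.nodup_singleton s)
    (by
      intro v hv
      have hvs : v = s := by simpa using hv
      subst hvs
      exact ⟨hs0, by rw [hget0 v hs0 hsN, if_pos rfl]⟩)
    (by
      intro i
      rw [hlen0, hr0]
      constructor
      · intro hi
        obtain ⟨hir, hne⟩ := List.mem_filter.mp hi
        obtain ⟨h0, h1⟩ := PySem.List.mem_pyRange_one.mp hir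
        have hins : i ≠ s := by simpa using hne
        exact ⟨h0, h1, by rw [hget0 i h0 h1, if_neg hins]⟩
      · rintro ⟨h0, h1, h2⟩
        rw [hget0 i h0 h1] at h2
        have hins : i ≠ s := by
          intro h
          rw [if_pos h] at h2
          exact absurd h2 (by simp)
        exact List.mem_filter.mpr ⟨PySem.List.mem_pyRange_one.mpr ⟨h0, h1⟩, by simpa using hins⟩)
    ((PySem.List.nodup_pyRange_one 0 (N : Int)).filter _)
    (by
      have hlr : (PySem.List.pyRange 0 (N : Int) 1).length = N := by
        rw [PySem.List.length_pyRange_one]; omega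
      have hle : rest0.length ≤ N := by
        rw [hr0]; exact le_trans (List.length_filter_le _ _) (le_of_eq hlr)
      simp only [List.length_singleton]
      omega)
    (by
      have hlr : (PySem.List.pyRange 0 (N : Int) 1).length = N := by
        rw [PySem.List.length_pyRange_one]; omega
      have hle : rest0.length ≤ N := by
        rw [hr0]; exact le_trans (List.length_filter_le _ _) (le_of_eq hlr)
      omega)
  rw [hsets, key]
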